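-- pv_equiv track=rewrite | github.com/ShahbajAlam/NQT-Coding-Python | Strings/10/solution.py | helper
-- ===== SOURCE A (Python) =====
-- def helper(word: str):
--     result = ""
--     for i in range(len(word)):
--         if i == 0 or i == len(word) - 1:
--             result += word[i].upper()
--         else:
--             result += word[i]
--
--     return result
-- ===== SOURCE B (Python) =====
-- def helper(word: str):
--     if len(word) <= 1:
--         return word.upper()
--     return word[0].upper() + word[1:-1] + word[-1].upper()
-- ===== Notes on version B (the rewrite author's own statement) =====
-- stated objective: simpler
-- what changed: Replaces the index loop with its O(n^2) string-accumulator by an O(n) sliced composition: uppercase first char + untouched middle slice + uppercase last char, with a trivial guard for length <= 1.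
import Mathlib
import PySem

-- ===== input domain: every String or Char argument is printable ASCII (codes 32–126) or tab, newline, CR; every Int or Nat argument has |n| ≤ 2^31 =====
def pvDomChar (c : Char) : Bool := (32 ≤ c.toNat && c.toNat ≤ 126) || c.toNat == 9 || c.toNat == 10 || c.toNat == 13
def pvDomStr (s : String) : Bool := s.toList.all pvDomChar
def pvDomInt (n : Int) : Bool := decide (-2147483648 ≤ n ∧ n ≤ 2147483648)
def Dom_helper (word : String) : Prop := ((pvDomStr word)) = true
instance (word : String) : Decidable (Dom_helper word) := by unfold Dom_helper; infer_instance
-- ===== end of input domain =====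

-- B replaces A's index loop with an accumulator by a sliced composition
-- (uppercased first char ++ middle slice ++ uppercased last char); objective: simpler.

-- ===== PORT A =====
def helper (word : String) : String :=
  String.ofList <|
    (PySem.List.pyRange 0 (word.toList.length : Int) 1).foldl
      (fun result i =>
        if i = 0 ∨ i = (word.toList.length : Int) - 1 then
          result ++ PySem.Chars.upper [PySem.List.pyGetD word.toList i ' ']
        else
          result ++ [PySem.List.pyGetD word.toList i ' '])
      []

-- ===== PORT B =====
def helper_alt (word : String) : String :=
  if word.toList.length ≤ 1 then
    String.ofList (PySem.Chars.upper word.toList)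
  else
    String.ofList
      (PySem.Chars.upper [PySem.List.pyGetD word.toList 0 ' ']
        ++ PySem.List.slice word.toList (some 1) (some (-1))
        ++ PySem.Chars.upper [PySem.List.pyGetD word.toList (-1) ' '])

-- ===== PRECONDITION & SPEC =====
def Spec_helper (word : String) (out : String) : Prop := out = helper_alt word
instance (word : String) (out : String) : Decidable (Spec_helper word out) := by unfold Spec_helper; infer_instance

-- ===== CLAIM (what is proved, stated in full; the proofs are below) =====
def Claim_equal_helper : Prop := ∀ (word : String), Dom_helper word → Spec_helper word (helper word)

-- ===== LEMMAS AND PROOFS =====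

-- (fact specific to this pair of programs' middle segment)
lemma map_getD_range_eq_take (ys : List Char) (d : Char) :
    ∀ m, m ≤ ys.length → (List.range m).map (fun k => ys.getD k d) = ys.take m := by
  intro m
  induction m with
  | zero => simp
  | succ m ih =>
    intro h
    rw [List.range_succ, List.map_append, ih (by omega), List.take_add_one]
    simp [List.getD_eq_getElem?_getD, List.getElem?_eq_getElem (by omega : m < ys.length)]

lemma helper_eq_alt (cs : List Char) :
    (PySem.List.pyRange 0 (cs.length : Int) 1).foldl
      (fun result i =>
        if i = 0 ∨ i = (cs.length : Int) - 1 then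
          result ++ PySem.Chars.upper [PySem.List.pyGetD cs i ' ']
        else
          result ++ [PySem.List.pyGetD cs i ' '])
      [] =
    (if cs.length ≤ 1 then PySem.Chars.upper cs
     else PySem.Chars.upper [PySem.List.pyGetD cs 0 ' ']
        ++ PySem.List.slice cs (some 1) (some (-1))
        ++ PySem.Chars.upper [PySem.List.pyGetD cs (-1) ' ']) := by
  have hbody :
      (fun (result : List Char) (i : Int) =>
        if i = 0 ∨ i = (cs.length : Int) - 1 then
          result ++ PySem.Chars.upper [PySem.List.pyGetD cs i ' ']
        else
          result ++ [PySem.List.pyGetD cs i ' ']) =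
      (fun result i => result ++
        [if i = 0 ∨ i = (cs.length : Int) - 1 then
           PySem.Chars.upperChar (PySem.List.pyGetD cs i ' ')
         else PySem.List.pyGetD cs i ' ']) := by
    funext result i
    by_cases h : i = 0 ∨ i = (cs.length : Int) - 1 <;> simp [h, PySem.Chars.upper]
  rw [hbody, PySem.List.pyRange_zero_nat, List.foldl_map,
      PySem.List.foldl_append_singleton_eq_map]
  simp only [List.nil_append]
  rcases cs with _ | ⟨c, _ | ⟨c', rest⟩⟩
  · simp [PySem.Chars.upper]
  · simp [List.range_succ, PySem.Chars.upper]
  · have hgt : ¬((c :: c' :: rest).length ≤ 1) := by simp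
    rw [if_neg hgt]
    obtain ⟨m, hm⟩ : ∃ m, (c :: c' :: rest).length = m + 2 := ⟨rest.length, by simp⟩
    have hsplit : List.range (c :: c' :: rest).length
        = 0 :: (List.range m).map Nat.succ ++ [m + 1] := by
      rw [hm, show m + 2 = (m + 1) + 1 from rfl, List.range_succ, List.range_succ_eq_map]
    rw [hsplit]
    simp only [List.map_append, List.map_cons, List.map_nil, List.cons_append]
    have h0 : ((0 : Nat) : Int) = 0 ∨ ((0 : Nat) : Int) = ((c :: c' :: rest).length : Int) - 1 :=
      Or.inl (by norm_num)
    have hL : ((m + 1 : Nat) : Int) = 0 ∨ ((m + 1 : Nat) : Int) = ((c :: c' :: rest).length : Int) - 1 :=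
      Or.inr (by push_cast [hm]; ring)
    rw [if_pos h0, if_pos hL]
    have hmid : (List.map Nat.succ (List.range m)).map (fun k =>
        if ((k : Nat) : Int) = 0 ∨ ((k : Nat) : Int) = ((c :: c' :: rest).length : Int) - 1 then
          PySem.Chars.upperChar (PySem.List.pyGetD (c :: c' :: rest) ((k : Nat) : Int) ' ')
        else PySem.List.pyGetD (c :: c' :: rest) ((k : Nat) : Int) ' ') =
        (List.range m).map (fun k => (c' :: rest).getD k ' ') := by
      rw [List.map_map]
      apply List.map_congr_left
      intro k hk
      have hkm : k < m := List.mem_range.mp hk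
      simp only [Function.comp]
      rw [if_neg (by push_cast [hm]; omega), PySem.List.pyGetD_natCast]
      simp [Nat.succ_eq_add_one]
    rw [hmid, map_getD_range_eq_take (c' :: rest) ' ' m (by simp at hm ⊢; omega)]
    have hslice : PySem.List.slice (c :: c' :: rest) (some 1) (some (-1))
        = (c' :: rest).take m := by
      have hr : rest.length = m := by simpa using hm
      rw [PySem.List.slice]
      simp only [PySem.List.clampIdx]
      split_ifs <;> simp <;> omega
    have hneg : PySem.List.pyGetD (c :: c' :: rest) (-1) ' '
        = (c :: c' :: rest).getLast (by simp) :=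
      PySem.List.pyGetD_neg_one _ ' ' (by simp)
    have hget0 : PySem.List.pyGetD (c :: c' :: rest) 0 ' ' = c := by
      rw [show (0 : Int) = ((0 : Nat) : Int) from rfl, PySem.List.pyGetD_natCast]; rfl
    have hgetLast : PySem.List.pyGetD (c :: c' :: rest) ((m + 1 : Nat) : Int) ' '
        = (c :: c' :: rest).getLast (by simp) := by
      rw [PySem.List.pyGetD_natCast, List.getLast_eq_getElem]
      simp [List.getD_eq_getElem?_getD, hm]
    rw [hslice, hneg, hget0, hgetLast]
    simp [PySem.Chars.upper]

-- ===== VERDICT (by name: the statement is the Claim_ definition above) =====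
theorem helper_spec : Claim_equal_helper := by
  intro word _
  unfold Spec_helper helper helper_alt
  rw [helper_eq_alt]
  split_ifs <;> rfl
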